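-- pv_equiv track=rewrite | github.com/Olly-Fallows/BSc-FYP | dev/ollyfallows/src/output2val.py | cost
-- ===== SOURCE A (Python) =====
-- TP = 0
--
-- FP = 1
--
-- TN = 2
--
-- FN = 3
--
-- def cost(l):
--     result = [[0,0,0,0],[0,0,0,0],[0,0,0,0],[0,0,0,0],[0,0,0,0]]
--     for a in l:
--         if a[0] == a[1]:
--             result[a[0]][TP] += 1
--             for b in range(5):
--                 if a[0] == b:
--                     continue
--                 result[b][TN] += 1
--         else:
--             result[a[1]][FP] += 1
--             result[a[0]][FN] += 1
--             for b in range(5):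
--                 if a[0] == b or a[1] == b:
--                     continue
--                 result[b][TN] += 1
--     return result
-- ===== SOURCE B (Python) =====
-- TP = 0
-- FP = 1
-- TN = 2
-- FN = 3
--
-- def cost(l):
--     # One pass: tally TP/FP/FN plus per-class counters; each TN comes out by complement.
--     result = [[0, 0, 0, 0] for _ in range(5)]
--     n = 0
--     actual = {}    # actual[c]  = number of samples whose true label equals c
--     mispred = {}   # mispred[c] = number of mismatched samples predicted as c
--     for a in l:
--         t, p = a[0], a[1]
--         if t == p:
--             result[t][TP] += 1
--         else:
--             result[p][FP] += 1
--             result[t][FN] += 1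
--             mispred[p] = mispred.get(p, 0) + 1
--         actual[t] = actual.get(t, 0) + 1
--         n += 1
--     for b in range(5):
--         result[b][TN] = n - actual.get(b, 0) - mispred.get(b, 0)
--     return result
-- ===== Notes on version B (the rewrite author's own statement) =====
-- stated objective: alternative
-- what changed: B replaces A's per-sample inner loop over all 5 classes (which increments TN for every non-involved class) by a single pass that tallies only TP/FP/FN plus per-class actual/mispredicted counters, and computes each TN afterwards in closed form as n - actual[b] - mispred[b].
import Mathlib
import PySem

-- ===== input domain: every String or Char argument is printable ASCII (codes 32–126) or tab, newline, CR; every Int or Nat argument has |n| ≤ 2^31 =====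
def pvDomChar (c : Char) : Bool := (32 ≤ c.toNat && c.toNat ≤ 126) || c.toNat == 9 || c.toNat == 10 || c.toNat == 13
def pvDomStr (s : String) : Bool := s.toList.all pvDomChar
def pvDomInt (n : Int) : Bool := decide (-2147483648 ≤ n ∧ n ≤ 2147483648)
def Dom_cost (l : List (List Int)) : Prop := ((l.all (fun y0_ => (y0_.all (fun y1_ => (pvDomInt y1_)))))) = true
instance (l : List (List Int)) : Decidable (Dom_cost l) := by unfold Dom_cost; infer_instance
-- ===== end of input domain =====

-- B tallies TP/FP/FN and per-class counters in one pass and sets each TN afterwards by the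
-- complement n - actual[b] - mispred[b], instead of A's inner 5-class TN loop per sample.


-- ===== PORT A =====
-- shared helper: Python's statement 'result[i][j] += 1' on the nested lists
def bump (r : List (List Int)) (i j : Int) : List (List Int) :=
  PySem.List.pySetD r i
    (PySem.List.pySetD (PySem.List.pyGetD r i []) j
      (PySem.List.pyGetD (PySem.List.pyGetD r i []) j 0 + 1))

-- body of A's 'for a in l' loop (TP=0, FP=1, TN=2, FN=3)
def stepA (result : List (List Int)) (a : List Int) : List (List Int) :=
  let a0 := PySem.List.pyGetD a 0 0
  let a1 := PySem.List.pyGetD a 1 0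
  if a0 = a1 then
    (PySem.List.pyRange 0 5 1).foldl
      (fun r b => if a0 = b then r else bump r b 2)
      (bump result a0 0)
  else
    (PySem.List.pyRange 0 5 1).foldl
      (fun r b => if a0 = b ∨ a1 = b then r else bump r b 2)
      (bump (bump result a1 1) a0 3)

def cost (l : List (List Int)) : List (List Int) :=
  l.foldl stepA [[0,0,0,0],[0,0,0,0],[0,0,0,0],[0,0,0,0],[0,0,0,0]]

-- ===== PORT B =====
-- body of B's single pass; state = (result, actual, mispred, n)
def stepB (s : List (List Int) × PySem.Dict Int Int × PySem.Dict Int Int × Int)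
    (a : List Int) : List (List Int) × PySem.Dict Int Int × PySem.Dict Int Int × Int :=
  match s with
  | (result, actual, mispred, n) =>
    let a0 := PySem.List.pyGetD a 0 0
    let a1 := PySem.List.pyGetD a 1 0
    let rm := if a0 = a1 then (bump result a0 0, mispred)
              else (bump (bump result a1 1) a0 3, mispred.modify a1 0 (· + 1))
    (rm.1, actual.modify a0 0 (· + 1), rm.2, n + 1)

-- B's closing pass: result[b][TN] = n - actual.get(b, 0) - mispred.get(b, 0)
def finishB (s : List (List Int) × PySem.Dict Int Int × PySem.Dict Int Int × Int) :
    List (List Int) :=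
  match s with
  | (result, actual, mispred, n) =>
    (PySem.List.pyRange 0 5 1).foldl
      (fun r b => PySem.List.pySetD r b
        (PySem.List.pySetD (PySem.List.pyGetD r b []) 2
          (n - actual.getD b 0 - mispred.getD b 0))) result

def cost_alt (l : List (List Int)) : List (List Int) :=
  finishB (l.foldl stepB
    ((PySem.List.pyRange 0 5 1).map (fun _ => ([0, 0, 0, 0] : List Int)),
      PySem.Dict.empty, PySem.Dict.empty, 0))

-- ===== PRECONDITION & SPEC =====
-- Pre_cost: exactly the inputs on which the Python A raises no IndexError — every
-- sample has at least two entries and its first two entries index the 5 result rows.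
def Pre_cost (l : List (List Int)) : Prop :=
  ∀ a ∈ l, 2 ≤ a.length ∧
    -5 ≤ PySem.List.pyGetD a 0 0 ∧ PySem.List.pyGetD a 0 0 < 5 ∧
    -5 ≤ PySem.List.pyGetD a 1 0 ∧ PySem.List.pyGetD a 1 0 < 5
instance (l : List (List Int)) : Decidable (Pre_cost l) := by unfold Pre_cost; infer_instance
def pvWitness_cost : List (List Int) := [[0, 0], [1, 2], [-1, 3]]
def Spec_cost (l : List (List Int)) (out : List (List Int)) : Prop := out = cost_alt l
instance (l : List (List Int)) (out : List (List Int)) : Decidable (Spec_cost l out) := by unfold Spec_cost; infer_instance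

-- ===== CLAIM (what is proved, stated in full; the proofs are below) =====
def Claim_equal_cost : Prop := ∀ (l : List (List Int)), Dom_cost l → Pre_cost l → Spec_cost l (cost l)

-- ===== LEMMAS AND PROOFS =====

-- the row of the 5-row result that a (possibly negative) Python index i lands on
def widx (i : Int) : Nat := if 0 ≤ i then i.toNat else (i + 5).toNat

-- the result grid's shape invariant: 5 rows of 4 entries
def Shape (r : List (List Int)) : Prop := r.length = 5 ∧ ∀ row ∈ r, row.length = 4

-- one cell of the grid
def cell (r : List (List Int)) (b c : Nat) : Int := (r.getD b []).getD c 0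

lemma widx_lt {i : Int} (h1 : -5 ≤ i) (h2 : i < 5) : widx i < 5 := by
  unfold widx; split <;> omega

lemma idx5 {i : Int} (h1 : -5 ≤ i) (h2 : i < 5) :
    PySem.List.pyIdx? 5 i = some (widx i) := by
  unfold PySem.List.pyIdx? widx
  split_ifs with hA hB hC
  · rfl
  · omega
  · congr 1; omega
  · omega

lemma getD_set {α : Type} (l : List α) (w b : Nat) (v d : α)
    (hw : w < l.length) (hb : b < l.length) :
    (l.set w v).getD b d = if b = w then v else l.getD b d := by
  by_cases h : b = w
  · subst h
    rw [PySem.List.getD_eq_getElem_of_lt _ _ _ (by simpa using hb), if_pos rfl,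
      List.getElem_set_self]
  · rw [PySem.List.getD_eq_getElem_of_lt _ _ _ (by simpa using hb), if_neg h,
      List.getElem_set_ne (by omega), ← PySem.List.getD_eq_getElem_of_lt _ _ _ hb]

lemma row_len {r : List (List Int)} (hS : Shape r) {w : Nat} (hw : w < 5) :
    (r.getD w []).length = 4 := by
  have h5 := hS.1
  have hwl : w < r.length := by omega
  rw [PySem.List.getD_eq_getElem_of_lt _ _ _ hwl]
  exact hS.2 _ (List.getElem_mem hwl)

lemma row_read {r : List (List Int)} {i : Int} (hS : Shape r) (h1 : -5 ≤ i) (h2 : i < 5) :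
    PySem.List.pyGetD r i [] = r.getD (widx i) [] := by
  have h5 := hS.1
  have hwlt := widx_lt h1 h2
  have hwl : widx i < r.length := by omega
  simp only [PySem.List.pyGetD, PySem.List.pyGet?, h5, idx5 h1 h2, Option.bind_some]
  rw [PySem.List.getD_eq_getElem_of_lt _ _ _ hwl]
  simp [List.getElem?_eq_getElem hwl]

lemma set_write {r : List (List Int)} {i : Int} (hS : Shape r) (h1 : -5 ≤ i) (h2 : i < 5)
    (v : List Int) :
    PySem.List.pySetD r i v = r.set (widx i) v := by
  simp [PySem.List.pySetD, PySem.List.pySet?, hS.1, idx5 h1 h2]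

lemma shape_setcol {r : List (List Int)} {i j : Int} (hS : Shape r)
    (h1 : -5 ≤ i) (h2 : i < 5) (v : Int) :
    Shape (PySem.List.pySetD r i (PySem.List.pySetD (PySem.List.pyGetD r i []) j v)) := by
  rw [set_write hS h1 h2, row_read hS h1 h2]
  constructor
  · simp [hS.1]
  · intro row hrow
    rcases List.mem_or_eq_of_mem_set hrow with h | h
    · exact hS.2 _ h
    · rw [h, PySem.List.length_pySetD]
      exact row_len hS (widx_lt h1 h2)

lemma cell_setcol {r : List (List Int)} {i : Int} (j : Int) (hS : Shape r)
    (h1 : -5 ≤ i) (h2 : i < 5) (hj0 : 0 ≤ j) (hj4 : j < 4) (v : Int)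
    {b c : Nat} (hb : b < 5) (hc : c < 4) :
    cell (PySem.List.pySetD r i (PySem.List.pySetD (PySem.List.pyGetD r i []) j v)) b c
      = if ((b : Int) = i ∨ (b : Int) = i + 5) ∧ j = (c : Int) then v else cell r b c := by
  have h5 := hS.1
  have hwlt := widx_lt h1 h2
  have hrl := row_len hS hwlt
  rw [set_write hS h1 h2, row_read hS h1 h2, PySem.List.pySetD_of_nonneg _ _ hj0]
  unfold cell
  rw [getD_set r (widx i) b _ [] (by omega) (by omega)]
  by_cases hbw : b = widx i
  · rw [if_pos hbw]
    rw [getD_set _ j.toNat c _ 0 (by omega) (by omega)]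
    have hcnd : (((b : Int) = i ∨ (b : Int) = i + 5) ∧ j = (c : Int)) ↔ (c = j.toNat) := by
      unfold widx at hbw; split at hbw <;> omega
    simp only [hcnd]
    rw [hbw]
  · rw [if_neg hbw]
    have hcnd : ¬(((b : Int) = i ∨ (b : Int) = i + 5) ∧ j = (c : Int)) := by
      unfold widx at hbw; split at hbw <;> omega
    rw [if_neg hcnd]

lemma cell_bump {r : List (List Int)} {i : Int} (j : Int) (hS : Shape r)
    (h1 : -5 ≤ i) (h2 : i < 5) (hj0 : 0 ≤ j) (hj4 : j < 4)
    {b c : Nat} (hb : b < 5) (hc : c < 4) :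
    cell (bump r i j) b c
      = cell r b c + (if ((b : Int) = i ∨ (b : Int) = i + 5) ∧ j = (c : Int) then 1 else 0) := by
  have hrl := row_len hS (widx_lt h1 h2)
  unfold bump
  rw [cell_setcol j hS h1 h2 hj0 hj4 _ hb hc]
  rw [row_read hS h1 h2,
    PySem.List.pyGetD_eq_getElem _ _ hj0 (by omega),
    ← PySem.List.getD_eq_getElem_of_lt _ _ 0 (by omega)]
  split_ifs with h
  · have hbw : b = widx i := by
      unfold widx; rcases h.1 with h' | h' <;> split <;> omega
    have hcj : c = j.toNat := by omega
    rw [hbw, hcj]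
    unfold cell
    rfl
  · omega

lemma shape_bump {r : List (List Int)} {i : Int} (j : Int) (hS : Shape r)
    (h1 : -5 ≤ i) (h2 : i < 5) : Shape (bump r i j) :=
  shape_setcol hS h1 h2 _

lemma shape_condbump {r : List (List Int)} (hS : Shape r) (P : Prop) [Decidable P]
    (k : Int) (h1 : -5 ≤ k) (h2 : k < 5) :
    Shape (if P then r else bump r k 2) := by
  split
  · exact hS
  · exact shape_bump 2 hS h1 h2

lemma cell_condbump {r : List (List Int)} (hS : Shape r) (P : Prop) [Decidable P]
    (k : Int) (h1 : -5 ≤ k) (h2 : k < 5) {b c : Nat} (hb : b < 5) (hc : c < 4) :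
    cell (if P then r else bump r k 2) b c
      = cell r b c
        + (if ¬P ∧ (((b : Int) = k ∨ (b : Int) = k + 5) ∧ (2 : Int) = (c : Int)) then 1 else 0) := by
  by_cases hP : P
  · simp [hP]
  · rw [if_neg hP, cell_bump 2 hS h1 h2 (by omega) (by omega) hb hc]
    congr 1
    simp [hP]

lemma cell_tnloop {r : List (List Int)} (hS : Shape r) (Q : Int → Prop) [DecidablePred Q]
    {b c : Nat} (hb : b < 5) (hc : c < 4) :
    cell (([0, 1, 2, 3, 4] : List Int).foldl (fun r k => if Q k then r else bump r k 2) r) b c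
      = cell r b c + (if ¬ Q (b : Int) ∧ c = 2 then 1 else 0) := by
  have s0 := hS
  have s1 := shape_condbump s0 (Q 0) 0 (by omega) (by omega)
  have s2 := shape_condbump s1 (Q 1) 1 (by omega) (by omega)
  have s3 := shape_condbump s2 (Q 2) 2 (by omega) (by omega)
  have s4 := shape_condbump s3 (Q 3) 3 (by omega) (by omega)
  simp only [List.foldl_cons, List.foldl_nil]
  rw [cell_condbump s4 (Q 4) 4 (by omega) (by omega) hb hc,
    cell_condbump s3 (Q 3) 3 (by omega) (by omega) hb hc,
    cell_condbump s2 (Q 2) 2 (by omega) (by omega) hb hc,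
    cell_condbump s1 (Q 1) 1 (by omega) (by omega) hb hc,
    cell_condbump s0 (Q 0) 0 (by omega) (by omega) hb hc]
  by_cases hc2 : c = 2
  · subst hc2
    have hbs : b = 0 ∨ b = 1 ∨ b = 2 ∨ b = 3 ∨ b = 4 := by omega
    rcases hbs with h | h | h | h | h <;> subst h <;> simp
  · have h2c : ¬((2 : Int) = (c : Int)) := by omega
    simp [h2c, hc2]

lemma shape_tnloop {r : List (List Int)} (hS : Shape r) (Q : Int → Prop) [DecidablePred Q] :
    Shape (([0, 1, 2, 3, 4] : List Int).foldl (fun r k => if Q k then r else bump r k 2) r) := by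
  simp only [List.foldl_cons, List.foldl_nil]
  exact shape_condbump (shape_condbump (shape_condbump (shape_condbump (shape_condbump hS
    (Q 0) 0 (by omega) (by omega)) (Q 1) 1 (by omega) (by omega)) (Q 2) 2 (by omega) (by omega))
    (Q 3) 3 (by omega) (by omega)) (Q 4) 4 (by omega) (by omega)

lemma getD_modify_add (d : PySem.Dict Int Int) (k k' : Int) :
    (d.modify k 0 (· + 1)).getD k' 0 = d.getD k' 0 + (if k' = k then 1 else 0) := by
  by_cases h : k' = k
  · subst h
    rw [PySem.Dict.getD_modify_self, if_pos rfl]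
  · rw [PySem.Dict.getD_modify_of_ne _ _ _ h, if_neg h]
    omega

lemma shape_finishB (act mis : PySem.Dict Int Int) (n : Int) {r : List (List Int)}
    (hS : Shape r) : Shape (finishB (r, act, mis, n)) := by
  simp only [finishB]
  rw [show PySem.List.pyRange 0 5 1 = [0, 1, 2, 3, 4] from by decide]
  simp only [List.foldl_cons, List.foldl_nil]
  exact shape_setcol (shape_setcol (shape_setcol (shape_setcol (shape_setcol hS
    (by omega) (by omega) _) (by omega) (by omega) _) (by omega) (by omega) _)
    (by omega) (by omega) _) (by omega) (by omega) _

lemma cell_finishB (act mis : PySem.Dict Int Int) (n : Int) {r : List (List Int)}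
    (hS : Shape r) {b c : Nat} (hb : b < 5) (hc : c < 4) :
    cell (finishB (r, act, mis, n)) b c
      = if c = 2 then n - act.getD (b : Int) 0 - mis.getD (b : Int) 0 else cell r b c := by
  simp only [finishB]
  rw [show PySem.List.pyRange 0 5 1 = [0, 1, 2, 3, 4] from by decide]
  have s0 := hS
  have s1 := shape_setcol (j := 2) s0 (show (-5:Int) ≤ 0 by omega) (show (0:Int) < 5 by omega)
    (n - act.getD 0 0 - mis.getD 0 0)
  have s2 := shape_setcol (j := 2) s1 (show (-5:Int) ≤ 1 by omega) (show (1:Int) < 5 by omega)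
    (n - act.getD 1 0 - mis.getD 1 0)
  have s3 := shape_setcol (j := 2) s2 (show (-5:Int) ≤ 2 by omega) (show (2:Int) < 5 by omega)
    (n - act.getD 2 0 - mis.getD 2 0)
  have s4 := shape_setcol (j := 2) s3 (show (-5:Int) ≤ 3 by omega) (show (3:Int) < 5 by omega)
    (n - act.getD 3 0 - mis.getD 3 0)
  simp only [List.foldl_cons, List.foldl_nil]
  rw [cell_setcol 2 s4 (by omega) (by omega) (by omega) (by omega) _ hb hc,
    cell_setcol 2 s3 (by omega) (by omega) (by omega) (by omega) _ hb hc,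
    cell_setcol 2 s2 (by omega) (by omega) (by omega) (by omega) _ hb hc,
    cell_setcol 2 s1 (by omega) (by omega) (by omega) (by omega) _ hb hc,
    cell_setcol 2 s0 (by omega) (by omega) (by omega) (by omega) _ hb hc]
  by_cases hc2 : c = 2
  · subst hc2
    have hbs : b = 0 ∨ b = 1 ∨ b = 2 ∨ b = 3 ∨ b = 4 := by omega
    rcases hbs with h | h | h | h | h <;> subst h <;> simp
  · have h2c : ¬((2 : Int) = (c : Int)) := by omega
    simp [h2c, hc2]

lemma ext5 {r r' : List (List Int)} (h : Shape r) (h' : Shape r')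
    (hcell : ∀ b c : Nat, b < 5 → c < 4 → cell r b c = cell r' b c) : r = r' := by
  have h5 := h.1
  have h5' := h'.1
  apply List.ext_getElem (by omega)
  intro i hi hi'
  have hrow : r[i].length = 4 := h.2 _ (List.getElem_mem hi)
  have hrow' : r'[i].length = 4 := h'.2 _ (List.getElem_mem hi')
  apply List.ext_getElem (by omega)
  intro j hj hj'
  have hcc := hcell i j (by omega) (by omega)
  unfold cell at hcc
  rw [PySem.List.getD_eq_getElem_of_lt _ _ _ hi] at hcc
  rw [PySem.List.getD_eq_getElem_of_lt _ _ _ hi'] at hcc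
  rw [PySem.List.getD_eq_getElem_of_lt _ _ _ (by omega)] at hcc
  rw [PySem.List.getD_eq_getElem_of_lt _ _ _ (by omega)] at hcc
  exact hcc

lemma step_comm {r : List (List Int)} {act mis : PySem.Dict Int Int} {n : Int}
    {a : List Int} (hS : Shape r)
    (h00 : -5 ≤ PySem.List.pyGetD a 0 0) (h01 : PySem.List.pyGetD a 0 0 < 5)
    (h10 : -5 ≤ PySem.List.pyGetD a 1 0) (h11 : PySem.List.pyGetD a 1 0 < 5) :
    stepA (finishB (r, act, mis, n)) a = finishB (stepB (r, act, mis, n) a) := by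
  have hF : Shape (finishB (r, act, mis, n)) := shape_finishB act mis n hS
  by_cases heq : PySem.List.pyGetD a 0 0 = PySem.List.pyGetD a 1 0
  · simp only [stepA, stepB, if_pos heq]
    rw [show PySem.List.pyRange 0 5 1 = [0, 1, 2, 3, 4] from by decide]
    apply ext5 (shape_tnloop (shape_bump 0 hF h00 h01) _)
      (shape_finishB _ _ _ (shape_bump 0 hS h00 h01))
    intro b c hb hc
    rw [cell_tnloop (shape_bump 0 hF h00 h01) (fun k => PySem.List.pyGetD a 0 0 = k) hb hc,
      cell_bump 0 hF h00 h01 (by omega) (by omega) hb hc,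
      cell_finishB act mis n hS hb hc,
      cell_finishB _ _ _ (shape_bump 0 hS h00 h01) hb hc,
      cell_bump 0 hS h00 h01 (by omega) (by omega) hb hc,
      getD_modify_add act (PySem.List.pyGetD a 0 0) (b : Int)]
    split_ifs <;> omega
  · simp only [stepA, stepB, if_neg heq]
    rw [show PySem.List.pyRange 0 5 1 = [0, 1, 2, 3, 4] from by decide]
    apply ext5 (shape_tnloop (shape_bump 3 (shape_bump 1 hF h10 h11) h00 h01) _)
      (shape_finishB _ _ _ (shape_bump 3 (shape_bump 1 hS h10 h11) h00 h01))
    intro b c hb hc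
    rw [cell_tnloop (shape_bump 3 (shape_bump 1 hF h10 h11) h00 h01)
        (fun k => PySem.List.pyGetD a 0 0 = k ∨ PySem.List.pyGetD a 1 0 = k) hb hc,
      cell_bump 3 (shape_bump 1 hF h10 h11) h00 h01 (by omega) (by omega) hb hc,
      cell_bump 1 hF h10 h11 (by omega) (by omega) hb hc,
      cell_finishB act mis n hS hb hc,
      cell_finishB _ _ _ (shape_bump 3 (shape_bump 1 hS h10 h11) h00 h01) hb hc,
      cell_bump 3 (shape_bump 1 hS h10 h11) h00 h01 (by omega) (by omega) hb hc,
      cell_bump 1 hS h10 h11 (by omega) (by omega) hb hc,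
      getD_modify_add act (PySem.List.pyGetD a 0 0) (b : Int),
      getD_modify_add mis (PySem.List.pyGetD a 1 0) (b : Int)]
    split_ifs <;> omega

lemma shape_stepB {r : List (List Int)} {act mis : PySem.Dict Int Int} {n : Int}
    {a : List Int} (hS : Shape r)
    (h00 : -5 ≤ PySem.List.pyGetD a 0 0) (h01 : PySem.List.pyGetD a 0 0 < 5)
    (h10 : -5 ≤ PySem.List.pyGetD a 1 0) (h11 : PySem.List.pyGetD a 1 0 < 5) :
    Shape (stepB (r, act, mis, n) a).1 := by
  simp only [stepB]
  by_cases heq : PySem.List.pyGetD a 0 0 = PySem.List.pyGetD a 1 0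
  · simp only [if_pos heq]
    exact shape_bump 0 hS h00 h01
  · simp only [if_neg heq]
    exact shape_bump 3 (shape_bump 1 hS h10 h11) h00 h01

lemma fold_comm (l : List (List Int)) :
    ∀ s : List (List Int) × PySem.Dict Int Int × PySem.Dict Int Int × Int,
      Shape s.1 → Pre_cost l →
      l.foldl stepA (finishB s) = finishB (l.foldl stepB s) := by
  induction l with
  | nil => intro s _ _; rfl
  | cons a t ih =>
    intro s hS hpre
    obtain ⟨r, act, mis, n⟩ := s
    have ha := hpre a (by simp)
    simp only [List.foldl_cons]
    rw [step_comm hS ha.2.1 ha.2.2.1 ha.2.2.2.1 ha.2.2.2.2]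
    exact ih _ (shape_stepB hS ha.2.1 ha.2.2.1 ha.2.2.2.1 ha.2.2.2.2)
      (fun x hx => hpre x (List.mem_cons_of_mem _ hx))

-- ===== VERDICT (by name: the statement is the Claim_ definition above) =====
theorem cost_spec : Claim_equal_cost := by
  unfold Claim_equal_cost Spec_cost
  intro l _ hpre
  unfold cost cost_alt
  have hSi : Shape [[0,0,0,0],[0,0,0,0],[0,0,0,0],[0,0,0,0],[0,0,0,0]] := by
    constructor
    · rfl
    · intro row h
      simp only [List.mem_cons, List.not_mem_nil, or_false] at h
      rcases h with h | h | h | h | h <;> subst h <;> rfl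
  have h0 : finishB ([[0,0,0,0],[0,0,0,0],[0,0,0,0],[0,0,0,0],[0,0,0,0]],
      PySem.Dict.empty, PySem.Dict.empty, 0)
      = [[0,0,0,0],[0,0,0,0],[0,0,0,0],[0,0,0,0],[0,0,0,0]] := by decide
  have hinit : (PySem.List.pyRange 0 5 1).map (fun _ => ([0, 0, 0, 0] : List Int))
      = [[0,0,0,0],[0,0,0,0],[0,0,0,0],[0,0,0,0],[0,0,0,0]] := by decide
  rw [hinit, ← h0]
  exact fold_comm l _ hSi hpre
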